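-- pv_equiv track=rewrite | github.com/OktaSecurityLabs/hack_url_re | hack_url_re/batch_processing.py | process_bar_rparen
-- ===== SOURCE A (Python) =====
-- def process_bar_rparen(ex):
--     def _process(ss):
--         if ss.endswith('\\'):
--             return r'\|)'
--         else:
--             return ')?'
--
--     split = ex.split('|)')
--     return ''.join(ss + _process(ss) for ss in split[:-1]) + split[-1]
-- ===== SOURCE B (Python) =====
-- def process_bar_rparen(ex):
--     out = []
--     i = 0
--     n = len(ex)
--     while i < n:
--         if ex[i] == '\\' and ex[i+1:i+3] == '|)':
--             out.append('\\\\|)')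
--             i += 3
--         elif ex[i:i+2] == '|)':
--             out.append(')?')
--             i += 2
--         else:
--             out.append(ex[i])
--             i += 1
--     return ''.join(out)
-- ===== Notes on version B (the rewrite author's own statement) =====
-- stated objective: alternative
-- what changed: B replaces A's split-on-'|)' / map / join pipeline with a single explicit cursor scan over the raw string that recognises '\|)' and '|)' in place and appends the replacement directly.
import Mathlib
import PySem

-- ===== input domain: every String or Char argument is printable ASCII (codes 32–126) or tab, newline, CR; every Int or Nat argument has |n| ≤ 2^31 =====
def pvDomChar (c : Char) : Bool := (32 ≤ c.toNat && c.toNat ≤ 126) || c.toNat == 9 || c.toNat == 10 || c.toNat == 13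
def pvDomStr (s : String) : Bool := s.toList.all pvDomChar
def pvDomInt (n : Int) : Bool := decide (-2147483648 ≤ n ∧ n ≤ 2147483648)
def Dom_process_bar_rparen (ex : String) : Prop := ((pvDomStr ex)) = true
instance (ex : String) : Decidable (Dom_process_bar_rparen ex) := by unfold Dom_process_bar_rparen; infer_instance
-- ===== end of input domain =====

-- B replaces A's split-on-'|)' / map / join pipeline with a single cursor scan over the raw
-- string (alternative decomposition, same O(n) cost).

-- ===== PORT A =====
-- _process(ss)
def pvProcess (ss : List Char) : List Char :=
  if PySem.Chars.endswith ss ['\\'] then ['\\', '|', ')'] else [')', '?']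

def process_bar_rparen (ex : String) : String :=
  let split := PySem.Chars.splitOn ex.toList ['|', ')']
  String.ofList
    (PySem.Chars.join []
        ((PySem.List.slice split none (some (-1))).map (fun ss => ss ++ pvProcess ss))
      ++ PySem.List.pyGetD split (-1) [])

-- ===== PORT B =====
-- the slice test ex[i:i+2] == '|)' of Source B
def pvIsMark (l : List Char) : Bool := decide (l.take 2 = ['|', ')'])

-- the while loop of Source B: the cursor is the remaining suffix of the string
def pvScan (l : List Char) : List Char :=
  match l with
  | [] => []
  | c :: rest =>
    if c = '\\' ∧ pvIsMark rest then
      '\\' :: '\\' :: '|' :: ')' :: pvScan (rest.drop 2)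
    else if pvIsMark (c :: rest) then
      ')' :: '?' :: pvScan (rest.drop 1)
    else c :: pvScan rest
termination_by l.length
decreasing_by all_goals simp

def process_bar_rparen_alt (ex : String) : String := String.ofList (pvScan ex.toList)

-- ===== PRECONDITION & SPEC =====
def Spec_process_bar_rparen (ex : String) (out : String) : Prop := out = process_bar_rparen_alt ex
instance (ex : String) (out : String) : Decidable (Spec_process_bar_rparen ex out) := by unfold Spec_process_bar_rparen; infer_instance

-- ===== CLAIM (what is proved, stated in full; the proofs are below) =====
def Claim_equal_process_bar_rparen : Prop := ∀ (ex : String), Dom_process_bar_rparen ex → Spec_process_bar_rparen ex (process_bar_rparen ex)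

-- ===== LEMMAS AND PROOFS =====

-- unfueled specification of splitOn.go for the fixed separator ['|', ')']
def pvSp (l cur : List Char) : List (List Char) :=
  match l with
  | [] => [cur.reverse]
  | c :: rest =>
    if pvIsMark (c :: rest) then cur.reverse :: pvSp (rest.drop 1) []
    else pvSp rest (c :: cur)
termination_by l.length
decreasing_by all_goals simp

-- the suffix of A's output after the reversed current segment, given the previous character
def pvTl (l : List Char) (o : Option Char) : List Char :=
  match l with
  | [] => []
  | c :: rest =>
    if pvIsMark (c :: rest) then
      (if o = some '\\' then ['\\', '|', ')'] else [')', '?']) ++ pvTl (rest.drop 1) none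
    else c :: pvTl rest (some c)
termination_by l.length
decreasing_by all_goals simp

-- A's ''.join(ss + _process(ss) …) + split[-1], as a recursion over the split list
def pvJoinA : List (List Char) → List Char
  | [] => []
  | [p] => p
  | p :: q :: parts => p ++ pvProcess p ++ pvJoinA (q :: parts)

lemma pvIsMark_iff (l : List Char) : pvIsMark l = true ↔ ∃ t, l = '|' :: ')' :: t := by
  cases l with
  | nil => simp [pvIsMark]
  | cons a t =>
    cases t with
    | nil => simp [pvIsMark]
    | cons b t' => simp [pvIsMark, List.take]

lemma pvIsMark_cons_ne (c : Char) (rest : List Char) (h : c ≠ '|') :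
    pvIsMark (c :: rest) = false := by
  rw [Bool.eq_false_iff]
  intro hm
  obtain ⟨t, ht⟩ := (pvIsMark_iff _).mp hm
  exact h (by injection ht)

lemma pvIsPrefixOf_eq (l : List Char) :
    (['|', ')'].isPrefixOf l) = pvIsMark l := by
  cases l with
  | nil => simp [pvIsMark]
  | cons a t =>
    cases t with
    | nil => simp [pvIsMark, List.isPrefixOf]
    | cons b t' =>
      rw [Bool.eq_iff_iff]
      simp [pvIsMark, List.isPrefixOf, List.take]
      exact ⟨fun ⟨h1, h2⟩ => ⟨h1.symm, h2.symm⟩, fun ⟨h1, h2⟩ => ⟨h1.symm, h2.symm⟩⟩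

lemma pvGo_eq (fuel : Nat) :
    ∀ (l cur : List Char) (acc : List (List Char)), l.length < fuel →
      PySem.Chars.splitOn.go ['|', ')'] fuel l cur acc = acc.reverse ++ pvSp l cur := by
  induction fuel with
  | zero => intro l cur acc h; omega
  | succ n ih =>
    intro l cur acc h
    cases l with
    | nil => simp [PySem.Chars.splitOn.go, pvSp]
    | cons c rest =>
      rw [PySem.Chars.splitOn.go, pvIsPrefixOf_eq]
      by_cases hp : pvIsMark (c :: rest) = true
      · obtain ⟨t, ht⟩ := (pvIsMark_iff _).mp hp
        cases ht
        rw [if_pos hp]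
        rw [ih _ _ _ (by simp at h ⊢; omega)]
        rw [pvSp, if_pos hp]
        simp
      · rw [if_neg (by simp [hp])]
        rw [ih _ _ _ (by simp at h ⊢; omega)]
        rw [pvSp, if_neg hp]

lemma pvSplitOn_eq (l : List Char) :
    PySem.Chars.splitOn l ['|', ')'] = pvSp l [] := by
  have := pvGo_eq (l.length + 1) l [] [] (by omega)
  simpa [PySem.Chars.splitOn] using this

lemma pvSp_ne_nil (l cur : List Char) : pvSp l cur ≠ [] := by
  induction l, cur using pvSp.induct with
  | case1 cur => simp [pvSp]
  | case2 cur c rest hp ih => rw [pvSp, if_pos hp]; simp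
  | case3 cur c rest hp ih => rw [pvSp, if_neg hp]; exact ih

lemma pvSlice_neg_one {α : Type} (xs : List α) :
    PySem.List.slice xs none (some (-1)) = xs.dropLast := by
  simp [PySem.List.slice, PySem.List.clampIdx, List.dropLast_eq_take]
  cases xs with
  | nil => simp
  | cons a t => simp

lemma pvGetD_neg_one {α : Type} (xs : List α) (d : α) (h : xs ≠ []) :
    PySem.List.pyGetD xs (-1) d = xs.getLastD d := by
  cases xs with
  | nil => simp at h
  | cons a t =>
    simp [PySem.List.pyGetD, PySem.List.pyGet?, PySem.List.pyIdx?]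
    simp [List.getLast?_eq_getElem?]

lemma pvJoin_nil_eq_flatten (parts : List (List Char)) :
    PySem.Chars.join [] parts = parts.flatten := by
  induction parts with
  | nil => simp [PySem.Chars.join, List.intercalate]
  | cons p ps ih =>
    cases ps with
    | nil => simp [PySem.Chars.join, List.intercalate]
    | cons q ps' =>
      simp [PySem.Chars.join, List.intercalate] at ih ⊢
      simp [ih]

lemma pvAssemble (parts : List (List Char)) (h : parts ≠ []) :
    PySem.Chars.join [] ((PySem.List.slice parts none (some (-1))).map (fun ss => ss ++ pvProcess ss))
      ++ PySem.List.pyGetD parts (-1) [] = pvJoinA parts := by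
  induction parts with
  | nil => exact absurd rfl h
  | cons p parts ih =>
    cases parts with
    | nil => simp [pvSlice_neg_one, pvGetD_neg_one, pvJoinA]
    | cons q parts' =>
      have ih' := ih (by simp)
      rw [pvSlice_neg_one, pvJoin_nil_eq_flatten, pvGetD_neg_one _ _ (by simp)] at ih' ⊢
      rw [List.dropLast_cons_of_ne_nil (by simp : q :: parts' ≠ ([] : List (List Char)))]
      simp only [List.map_cons, List.flatten_cons, pvJoinA]
      rw [← ih']
      simp [List.getLastD_eq_getLast?]

lemma pvProcess_reverse (cur : List Char) :
    pvProcess cur.reverse = (if cur.head? = some '\\' then ['\\', '|', ')'] else [')', '?']) := by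
  cases cur with
  | nil => simp [pvProcess, PySem.Chars.endswith, List.isSuffixOf]
  | cons c t =>
    simp only [pvProcess, PySem.Chars.endswith, List.isSuffixOf, List.reverse_cons, List.reverse_nil, List.head?_cons]
    by_cases hc : c = '\\'
    · subst hc; simp [List.isPrefixOf]
    · rw [if_neg (by simp [List.isPrefixOf]; exact fun h => hc h.symm), if_neg (by simp [hc])]

lemma pvK (l cur : List Char) :
    pvJoinA (pvSp l cur) = cur.reverse ++ pvTl l cur.head? := by
  induction l, cur using pvSp.induct with
  | case1 cur => simp [pvSp, pvTl, pvJoinA]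
  | case2 cur c rest hp ih =>
    rw [pvSp, if_pos hp, pvTl, if_pos hp]
    simp only [List.reverse_nil, List.nil_append, List.head?_nil] at ih
    rcases hq : pvSp (rest.drop 1) [] with _ | ⟨q, ps⟩
    · exact absurd hq (pvSp_ne_nil _ _)
    · rw [hq] at ih
      simp only [pvJoinA, pvProcess_reverse, ih, List.append_assoc]
  | case3 cur c rest hp ih =>
    rw [pvSp, if_neg hp, pvTl, if_neg hp]
    rw [ih]
    simp

lemma pvL (l : List Char) : ∀ o : Option Char,
    (o = some '\\' → ¬ pvIsMark l = true) → pvTl l o = pvScan l := by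
  induction l using pvScan.induct with
  | case1 => intro o _; simp [pvTl, pvScan]
  | case2 c rest hc ih =>
    intro o _
    obtain ⟨hc1, hc2⟩ := hc
    obtain ⟨t, ht⟩ := (pvIsMark_iff _).mp hc2
    subst hc1 ht
    rw [pvTl, if_neg (by simp [pvIsMark_cons_ne '\\' ('|' :: ')' :: t) (by decide)])]
    rw [pvTl, if_pos (by simp [pvIsMark, List.take]), if_pos rfl]
    rw [pvScan, if_pos ⟨rfl, hc2⟩]
    simpa using ih none (by simp)
  | case3 c rest hc hm ih =>
    intro o ho
    rw [pvTl, if_pos hm, if_neg (fun h => ho h hm)]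
    rw [pvScan, if_neg hc, if_pos hm]
    simpa using ih none (by simp)
  | case4 c rest hc hm ih =>
    intro o _
    rw [pvTl, if_neg (by simp [hm]), pvScan, if_neg hc, if_neg hm]
    have : some c = some '\\' → ¬ pvIsMark rest = true := by
      intro h hr
      exact hc ⟨by injection h, hr⟩
    simp [ih (some c) this]

-- ===== VERDICT (by name: the statement is the Claim_ definition above) =====
theorem process_bar_rparen_spec : Claim_equal_process_bar_rparen := by
  intro ex _
  simp only [Spec_process_bar_rparen, process_bar_rparen, process_bar_rparen_alt]
  rw [pvSplitOn_eq, pvAssemble _ (pvSp_ne_nil _ _), pvK]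
  simp only [List.reverse_nil, List.nil_append, List.head?_nil]
  rw [pvL _ none (by simp)]
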